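-- pv_equiv track=rewrite | github.com/postvakje/oeis-sequences | oeis-sequences/OEISsequences.py | A229294
-- ===== SOURCE A (Python) =====
-- def A229294(n):
--     ndict = {}
--     n2 = 2 * n
--     for i in range(n2):
--         i3 = pow(i, 2, n2)
--         for j in range(i + 1):
--             j3 = pow(j, 2, n2)
--             m = (i3 + j3) % n2
--             if m in ndict:
--                 if i == j:
--                     ndict[m] += 1
--                 else:
--                     ndict[m] += 2
--             else:
--                 if i == j:
--                     ndict[m] = 1
--                 else:
--                     ndict[m] = 2
--     count = 0
--     for i in ndict:
--         j = (n - i) % n2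
--         if j in ndict:
--             count += ndict[i] * ndict[j]
--     return count
-- ===== SOURCE B (Python) =====
-- def A229294(n):
--     # Count square residues once, convolve the counter with itself to get
--     # pair-sum counts, then pair those up; no triangular i>=j enumeration.
--     n2 = 2 * n
--     f = {}
--     for i in range(n2):
--         r = i * i % n2
--         f[r] = f.get(r, 0) + 1
--     g = {}
--     for r, cr in f.items():
--         for s, cs in f.items():
--             m = (r + s) % n2
--             g[m] = g.get(m, 0) + cr * cs
--     return sum(c * g.get((n - m) % n2, 0) for m, c in g.items())
-- ===== Notes on version B (the rewrite author's own statement) =====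
-- stated objective: faster
-- what changed: Instead of enumerating all i>=j pairs with doubling weights into one dict of pair sums, B counts each square residue mod 2n once and then convolves that counter with itself over the distinct residues only, pairing the resulting sums at the end.
import Mathlib
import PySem

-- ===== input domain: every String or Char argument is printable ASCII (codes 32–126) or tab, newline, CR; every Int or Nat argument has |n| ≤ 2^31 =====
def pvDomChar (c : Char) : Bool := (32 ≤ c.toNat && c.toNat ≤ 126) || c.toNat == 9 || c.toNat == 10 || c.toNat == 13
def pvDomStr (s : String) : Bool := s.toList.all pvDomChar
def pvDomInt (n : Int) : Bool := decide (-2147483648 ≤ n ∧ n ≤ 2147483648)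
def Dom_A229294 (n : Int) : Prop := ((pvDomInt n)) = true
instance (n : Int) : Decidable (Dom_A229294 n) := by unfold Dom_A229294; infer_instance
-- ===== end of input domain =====

-- B replaces A's triangular pair enumeration (with i==j doubling weights) by counting each
-- square residue once and convolving that counter with itself over the distinct residues.


-- ===== PORT A =====
def A229294 (n : Int) : Int :=
  let n2 := 2 * n
  let ndict := (PySem.List.pyRange 0 n2 1).foldl (fun ndict i =>
      let i3 := PySem.Int.powMod i 2 n2
      (PySem.List.pyRange 0 (i + 1) 1).foldl (fun ndict j =>
        let j3 := PySem.Int.powMod j 2 n2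
        let m := PySem.Int.mod (i3 + j3) n2
        if ndict.contains m then
          (if i = j then ndict.modify m 0 (· + 1) else ndict.modify m 0 (· + 2))
        else
          (if i = j then ndict.insert m 1 else ndict.insert m 2)) ndict) PySem.Dict.empty
  ndict.keys.foldl (fun count i =>
    let j := PySem.Int.mod (n - i) n2
    if ndict.contains j then count + ndict.getD i 0 * ndict.getD j 0 else count) 0

-- ===== PORT B =====
def A229294_alt (n : Int) : Int :=
  let n2 := 2 * n
  let f := (PySem.List.pyRange 0 n2 1).foldl (fun f i =>
      let r := PySem.Int.mod (i * i) n2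
      f.insert r (f.getD r 0 + 1)) PySem.Dict.empty
  let g := f.items.foldl (fun g rc =>
      f.items.foldl (fun g sc =>
        let m := PySem.Int.mod (rc.1 + sc.1) n2
        g.insert m (g.getD m 0 + rc.2 * sc.2)) g) PySem.Dict.empty
  (g.items.map (fun mc => mc.2 * g.getD (PySem.Int.mod (n - mc.1) n2) 0)).sum

-- ===== PRECONDITION & SPEC =====
def Spec_A229294 (n : Int) (out : Int) : Prop := out = A229294_alt n
instance (n : Int) (out : Int) : Decidable (Spec_A229294 n out) := by unfold Spec_A229294; infer_instance

-- ===== CLAIM (what is proved, stated in full; the proofs are below) =====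
def Claim_equal_A229294 : Prop := ∀ (n : Int), Dom_A229294 n → Spec_A229294 n (A229294 n)

-- ===== LEMMAS AND PROOFS =====

-- the canonical "weighted counter" step both dict-building loops reduce to
def wstep (d : PySem.Dict Int Int) (p : Int × Int) : PySem.Dict Int Int :=
  d.insert p.1 (d.getD p.1 0 + p.2)

-- the residue both programs bucket a pair (i, j) under
def keyf (n2 i j : Int) : Int :=
  PySem.Int.mod (PySem.Int.mod (i * i) n2 + PySem.Int.mod (j * j) n2) n2

-- flat (key, weight) streams of the two dict-building loops
def pairsA (n2 : Int) : List (Int × Int) :=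
  (PySem.List.pyRange 0 n2 1).flatMap (fun i =>
    (PySem.List.pyRange 0 (i + 1) 1).map (fun j => (keyf n2 i j, if i = j then (1 : Int) else 2)))

def rsL (n2 : Int) : List Int := (PySem.List.pyRange 0 n2 1).map (fun i => PySem.Int.mod (i * i) n2)

def itemsF (n2 : Int) : List (Int × Int) :=
  (PySem.Set.ofList (rsL n2)).map (fun k => (k, ((rsL n2).count k : Int)))

def pairsB (n2 : Int) : List (Int × Int) :=
  (itemsF n2).flatMap (fun rc =>
    (itemsF n2).map (fun sc => (PySem.Int.mod (rc.1 + sc.1) n2, rc.2 * sc.2)))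

-- number of ordered pairs (i, j) in [0, n2)² with keyf n2 i j = m
def TT (n2 m : Int) : Int :=
  ((List.range n2.toNat).map (fun (i : Nat) =>
    ((List.range n2.toNat).map (fun (j : Nat) =>
      if keyf n2 (i : Int) (j : Int) = m then (1 : Int) else 0)).sum)).sum

lemma keyf_symm (n2 i j : Int) : keyf n2 i j = keyf n2 j i := by
  simp [keyf, add_comm]

lemma modify_eq_insert (d : PySem.Dict Int Int) (k : Int) (v0 : Int) (f : Int → Int) :
    d.modify k v0 f = d.insert k (f (d.getD k v0)) := by
  simp [PySem.Dict.modify, PySem.Dict.getD_eq_get?_getD]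

lemma powMod_two (a m : Int) : PySem.Int.powMod a 2 m = PySem.Int.mod (a * a) m := by
  simp [PySem.Int.powMod, PySem.Int.mod, sq]

lemma map_congr_mem {α : Type} (l : List α) (f g : α → Int) (h : ∀ x ∈ l, f x = g x) :
    l.map f = l.map g := List.map_congr_left h

lemma getD_wfold (l : List (Int × Int)) (d : PySem.Dict Int Int) (m : Int) :
    (l.foldl wstep d).getD m 0
      = d.getD m 0 + (l.map (fun p => if p.1 = m then p.2 else 0)).sum := by
  induction l generalizing d with
  | nil => simp
  | cons p t ih =>
    simp only [List.foldl_cons, List.map_cons, List.sum_cons, ih]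
    rw [wstep, PySem.Dict.getD_insert]
    by_cases h : m = p.1
    · simp [h]; ring
    · simp [h, Ne.symm h]

lemma keys_wfold (l : List (Int × Int)) :
    (l.foldl wstep PySem.Dict.empty).keys = PySem.Set.ofList (l.map (·.1)) := by
  have := PySem.Dict.keys_foldl_insert_key (ν := Int) l (fun p => p.1)
      (fun d p => d.getD p.1 0 + p.2) PySem.Dict.empty
  simp only [PySem.Dict.keys_empty] at this
  rw [show (l.foldl wstep PySem.Dict.empty) =
      (l.foldl (fun d x => d.insert ((fun p : Int × Int => p.1) x)
        ((fun (d : PySem.Dict Int Int) (p : Int × Int) => d.getD p.1 0 + p.2) d x)) PySem.Dict.empty) from rfl, this]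
  simp [PySem.Set.update, PySem.Set.ofList]

lemma nodup_keys_wfold (l : List (Int × Int)) :
    (l.foldl wstep PySem.Dict.empty).keys.Nodup := by
  exact PySem.Dict.nodup_keys_foldl_insert_key l (fun p => p.1)
      (fun d p => d.getD p.1 0 + p.2) PySem.Dict.empty (by simp)

lemma sum_ite_fst_nonneg (l : List (Int × Int)) (m : Int) (hw : ∀ p ∈ l, 0 < p.2) :
    0 ≤ (l.map (fun p => if p.1 = m then p.2 else 0)).sum := by
  induction l with
  | nil => simp
  | cons p t ih =>
    simp only [List.map_cons, List.sum_cons]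
    have h1 := hw p (by simp)
    have h2 := ih (fun q hq => hw q (by simp [hq]))
    split_ifs <;> omega

lemma mem_fst_iff_sum_ne (l : List (Int × Int)) (m : Int) (hw : ∀ p ∈ l, 0 < p.2) :
    m ∈ l.map (·.1) ↔ (l.map (fun p => if p.1 = m then p.2 else 0)).sum ≠ 0 := by
  induction l with
  | nil => simp
  | cons p t ih =>
    have h1 := hw p (by simp)
    have ht : ∀ q ∈ t, 0 < q.2 := fun q hq => hw q (by simp [hq])
    have h2 := sum_ite_fst_nonneg t m ht
    simp only [List.map_cons, List.sum_cons, List.mem_cons, ih ht]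
    by_cases h : p.1 = m
    · simp [h]; omega
    · simp [h, Ne.symm h]

-- triangular enumeration with doubling off the diagonal = full square enumeration
lemma tri (F : Nat → Nat → Int) (hsym : ∀ i j, F i j = F j i) (N : Nat) :
    ((List.range N).map (fun i =>
      ((List.range (i + 1)).map (fun j => if i = j then F i j else 2 * F i j)).sum)).sum
    = ((List.range N).map (fun i => ((List.range N).map (fun j => F i j)).sum)).sum := by
  induction N with
  | zero => simp
  | succ N ih =>
    rw [List.range_succ]
    simp only [List.map_append, List.sum_append, List.map_cons, List.map_nil, List.sum_cons,
      List.sum_nil, add_zero]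
    rw [ih]
    have hrow : ((List.range (N + 1)).map (fun j => if N = j then F N j else 2 * F N j)).sum
        = 2 * ((List.range N).map (fun j => F N j)).sum + F N N := by
      rw [List.range_succ]
      simp only [List.map_append, List.sum_append, List.map_cons, List.map_nil, List.sum_cons,
        List.sum_nil, add_zero]
      rw [map_congr_mem (List.range N) _ (fun j => 2 * F N j)
        (by intro j hj; rw [List.mem_range] at hj; rw [if_neg (by omega)])]
      simp [PySem.List.sum_map_const_mul_int]
    have hswap : ((List.range N).map (fun i => F i N)).sum
        = ((List.range N).map (fun j => F N j)).sum := by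
      exact congrArg List.sum (map_congr_mem _ _ _ (fun i _ => hsym i N))
    rw [hrow, PySem.List.sum_map_add_int, hswap]
    ring

lemma pick_single (u : List Int) (hu : u.Nodup) (x : Int) (hx : x ∈ u) (h : Int → Int) :
    (u.map (fun v => if v = x then h v else 0)).sum = h x := by
  induction u with
  | nil => simp at hx
  | cons a t ih =>
    simp only [List.map_cons, List.sum_cons]
    rcases List.mem_cons.mp hx with rfl | hxt
    · rw [if_pos rfl]
      have hax : x ∉ t := (List.nodup_cons.mp hu).1
      have : (t.map (fun v => if v = x then h v else 0)).sum = 0 := by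
        rw [map_congr_mem t _ (fun _ => 0)
          (by intro v hv; rw [if_neg (by rintro rfl; exact hax hv)])]
        simp
      rw [this]; ring
    · have hax : a ≠ x := by rintro rfl; exact (List.nodup_cons.mp hu).1 hxt
      rw [if_neg hax, ih (List.nodup_cons.mp hu).2 hxt, zero_add]

-- summing count v * h v over the distinct values = summing h over the multiset
lemma group (u : List Int) (hu : u.Nodup) (xs : List Int) (hsub : ∀ x ∈ xs, x ∈ u) (h : Int → Int) :
    (u.map (fun v => (xs.count v : Int) * h v)).sum = (xs.map h).sum := by
  induction xs with
  | nil => simp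
  | cons x t ih =>
    have hsubt : ∀ y ∈ t, y ∈ u := fun y hy => hsub y (by simp [hy])
    have hxu : x ∈ u := hsub x (by simp)
    simp only [List.map_cons, List.sum_cons]
    rw [← ih hsubt]
    rw [map_congr_mem u _ (fun v => (t.count v : Int) * h v + (if v = x then h v else 0))
      (by
        intro v hv
        show ((x :: t).count v : Int) * h v = _
        by_cases hvx : v = x
        · simp only [hvx, List.count_cons_self]; push_cast; ring
        · simp only [List.count_cons, if_neg hvx]
          have : (x == v) = false := by simpa [beq_iff_eq] using fun hh => hvx hh.symm
          simp [this])]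
    rw [PySem.List.sum_map_add_int, pick_single u hu x hxu h]
    ring

lemma wstep_eq (d : PySem.Dict Int Int) (k w : Int) :
    wstep d (k, w) = if d.contains k then d.modify k 0 (· + w) else d.insert k w := by
  rw [wstep, modify_eq_insert]
  by_cases h : d.contains k
  · simp [h]
  · rw [PySem.Dict.getD_of_not_contains d 0 (by simpa using h), zero_add]
    simp [h]

lemma A_loop_eq (n2 : Int) :
    ((PySem.List.pyRange 0 n2 1).foldl (fun ndict i =>
        let i3 := PySem.Int.powMod i 2 n2
        (PySem.List.pyRange 0 (i + 1) 1).foldl (fun ndict j =>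
          let j3 := PySem.Int.powMod j 2 n2
          let m := PySem.Int.mod (i3 + j3) n2
          if ndict.contains m then
            (if i = j then ndict.modify m 0 (· + 1) else ndict.modify m 0 (· + 2))
          else
            (if i = j then ndict.insert m 1 else ndict.insert m 2)) ndict) PySem.Dict.empty)
    = (pairsA n2).foldl wstep PySem.Dict.empty := by
  rw [pairsA, List.foldl_flatMap]
  congr 1
  funext d i
  rw [List.foldl_map]
  show (PySem.List.pyRange 0 (i + 1) 1).foldl (fun ndict j =>
      let j3 := PySem.Int.powMod j 2 n2
      let m := PySem.Int.mod (PySem.Int.powMod i 2 n2 + j3) n2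
      if ndict.contains m then
        (if i = j then ndict.modify m 0 (· + 1) else ndict.modify m 0 (· + 2))
      else
        (if i = j then ndict.insert m 1 else ndict.insert m 2)) d = _
  congr 1
  funext d' j
  show (if d'.contains (PySem.Int.mod (PySem.Int.powMod i 2 n2 + PySem.Int.powMod j 2 n2) n2) then _ else _) = _
  rw [wstep_eq]
  by_cases hij : i = j
  · simp [hij, keyf, powMod_two]
  · simp [hij, keyf, powMod_two]

lemma B_f_eq (n2 : Int) :
    ((PySem.List.pyRange 0 n2 1).foldl (fun f i =>
        let r := PySem.Int.mod (i * i) n2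
        f.insert r (f.getD r 0 + 1)) PySem.Dict.empty)
    = PySem.Dict.counter (rsL n2) := by
  rw [rsL, ← PySem.Dict.foldl_insert_getD_add_one_eq_counter, List.foldl_map]

lemma B_g_eq (n2 : Int) :
    ((PySem.Dict.counter (rsL n2)).items.foldl (fun g rc =>
        (PySem.Dict.counter (rsL n2)).items.foldl (fun g sc =>
          let m := PySem.Int.mod (rc.1 + sc.1) n2
          g.insert m (g.getD m 0 + rc.2 * sc.2)) g) PySem.Dict.empty)
    = (pairsB n2).foldl wstep PySem.Dict.empty := by
  rw [pairsB, List.foldl_flatMap]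
  have hit : (PySem.Dict.counter (rsL n2)).items = itemsF n2 := by
    rw [itemsF, PySem.Dict.items_counter]
  rw [hit]
  congr 1
  funext d rc
  rw [List.foldl_map]
  rfl

lemma sum_flatMap {α : Type} (l : List α) (f : α → List Int) :
    (l.flatMap f).sum = (l.map (fun a => (f a).sum)).sum := by
  induction l with
  | nil => rfl
  | cons a t ih => simp [List.flatMap_cons, ih]

lemma sum_pyRange_zero (b : Int) (f : Int → Int) :
    ((PySem.List.pyRange 0 b 1).map f).sum
      = ((List.range b.toNat).map (fun (k : Nat) => f (k : Int))).sum := by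
  rw [PySem.List.pyRange_one, List.map_map, sub_zero]
  exact congrArg List.sum (map_congr_mem _ _ _ (fun k _ => by simp))

lemma mem_pyRange_zero (b x : Int) : x ∈ PySem.List.pyRange 0 b 1 ↔ 0 ≤ x ∧ x < b := by
  exact PySem.List.mem_pyRange_one

lemma sumA_eq_TT (n2 m : Int) :
    ((pairsA n2).map (fun p => if p.1 = m then p.2 else 0)).sum = TT n2 m := by
  rw [pairsA, List.map_flatMap, sum_flatMap, TT]
  rw [sum_pyRange_zero]
  rw [← tri (fun i j => if keyf n2 (i : Int) (j : Int) = m then (1 : Int) else 0)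
      (fun i j => by
        show (if keyf n2 (i:Int) (j:Int) = m then (1:Int) else 0)
            = (if keyf n2 (j:Int) (i:Int) = m then (1:Int) else 0)
        rw [keyf_symm])]
  congr 1
  apply map_congr_mem
  intro i _
  rw [List.map_map, sum_pyRange_zero]
  rw [show ((i : Int) + 1).toNat = i + 1 by omega]
  congr 1
  apply map_congr_mem
  intro j _
  simp only [Function.comp_def]
  by_cases hij : i = j
  · simp [hij]
  · have hij' : ¬((i : Int) = (j : Int)) := by exact_mod_cast hij
    simp only [if_neg hij, if_neg hij']
    split_ifs <;> ring

lemma sumB_eq_TT (n2 m : Int) :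
    ((pairsB n2).map (fun p => if p.1 = m then p.2 else 0)).sum = TT n2 m := by
  have hu : (PySem.Set.ofList (rsL n2)).Nodup := PySem.Set.nodup_ofList _
  have hsub : ∀ x ∈ rsL n2, x ∈ PySem.Set.ofList (rsL n2) :=
    fun x hx => (PySem.Set.mem_ofList _ _).mpr hx
  rw [pairsB, List.map_flatMap, sum_flatMap, itemsF, List.map_map]
  rw [map_congr_mem _ _ (fun r => ((rsL n2).count r : Int) *
      ((PySem.Set.ofList (rsL n2)).map (fun s => ((rsL n2).count s : Int) *
        (if PySem.Int.mod (r + s) n2 = m then (1:Int) else 0))).sum)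
    (by
      intro r _
      simp only [Function.comp_def, List.map_map]
      rw [← PySem.List.sum_map_const_mul_int]
      congr 1
      apply map_congr_mem
      intro s _
      split_ifs <;> ring)]
  rw [group _ hu _ hsub]
  rw [map_congr_mem (rsL n2) _ (fun x => ((rsL n2).map
      (fun y => if PySem.Int.mod (x + y) n2 = m then (1:Int) else 0)).sum)
    (by
      intro x _
      exact group _ hu _ hsub (fun y => if PySem.Int.mod (x + y) n2 = m then (1:Int) else 0))]
  rw [TT]
  rw [show rsL n2 = (PySem.List.pyRange 0 n2 1).map (fun i => PySem.Int.mod (i * i) n2) from rfl]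
  rw [List.map_map, sum_pyRange_zero]
  congr 1
  apply map_congr_mem
  intro i _
  simp only [Function.comp_def, List.map_map]
  rw [sum_pyRange_zero]
  congr 1

lemma mem_rsL (n2 x : Int) :
    x ∈ rsL n2 ↔ ∃ a : Nat, a < n2.toNat ∧ PySem.Int.mod ((a : Int) * a) n2 = x := by
  rw [rsL]
  constructor
  · intro hx
    rcases List.mem_map.mp hx with ⟨i, hi, rfl⟩
    rcases (mem_pyRange_zero _ _).mp hi with ⟨hi0, hi1⟩
    exact ⟨i.toNat, by omega, by rw [Int.toNat_of_nonneg hi0]⟩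
  · rintro ⟨a, ha, hk⟩
    exact List.mem_map.mpr ⟨(a : Int),
      (mem_pyRange_zero _ _).mpr ⟨by omega, by omega⟩, hk⟩

lemma memA_iff (n2 m : Int) :
    m ∈ (pairsA n2).map (·.1) ↔ ∃ i j : Nat, i < n2.toNat ∧ j < n2.toNat ∧ keyf n2 i j = m := by
  rw [pairsA]
  constructor
  · intro hm
    rcases List.mem_map.mp hm with ⟨p, hp, hpm⟩
    rcases List.mem_flatMap.mp hp with ⟨i, hi, hpi⟩
    rcases List.mem_map.mp hpi with ⟨j, hj, rfl⟩
    rcases (mem_pyRange_zero _ _).mp hi with ⟨hi0, hi1⟩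
    rcases (mem_pyRange_zero _ _).mp hj with ⟨hj0, hj1⟩
    refine ⟨i.toNat, j.toNat, by omega, by omega, ?_⟩
    rw [Int.toNat_of_nonneg hi0, Int.toNat_of_nonneg hj0]
    exact hpm
  · rintro ⟨a, b, ha, hb, hk⟩
    rcases le_or_gt b a with h | h
    · refine List.mem_map.mpr ⟨(keyf n2 (a : Int) (b : Int), if (a:Int) = (b:Int) then 1 else 2), ?_, hk⟩
      exact List.mem_flatMap.mpr ⟨(a : Int), (mem_pyRange_zero _ _).mpr ⟨by omega, by omega⟩,
        List.mem_map.mpr ⟨(b : Int), (mem_pyRange_zero _ _).mpr ⟨by omega, by omega⟩, rfl⟩⟩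
    · refine List.mem_map.mpr ⟨(keyf n2 (b : Int) (a : Int), if (b:Int) = (a:Int) then 1 else 2), ?_,
        by rw [show ((keyf n2 (b:Int) (a:Int), if (b:Int) = (a:Int) then (1:Int) else 2).1 =
          keyf n2 (b:Int) (a:Int)) from rfl, keyf_symm]; exact hk⟩
      exact List.mem_flatMap.mpr ⟨(b : Int), (mem_pyRange_zero _ _).mpr ⟨by omega, by omega⟩,
        List.mem_map.mpr ⟨(a : Int), (mem_pyRange_zero _ _).mpr ⟨by omega, by omega⟩, rfl⟩⟩

lemma memB_iff (n2 m : Int) :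
    m ∈ (pairsB n2).map (·.1) ↔ ∃ i j : Nat, i < n2.toNat ∧ j < n2.toNat ∧ keyf n2 i j = m := by
  rw [pairsB]
  constructor
  · intro hm
    rcases List.mem_map.mp hm with ⟨p, hp, hpm⟩
    rcases List.mem_flatMap.mp hp with ⟨rc, hrc, hpi⟩
    rcases List.mem_map.mp hpi with ⟨sc, hsc, rfl⟩
    rcases List.mem_map.mp hrc with ⟨r, hr, rfl⟩
    rcases List.mem_map.mp hsc with ⟨s, hs, rfl⟩
    rcases (mem_rsL n2 r).mp ((PySem.Set.mem_ofList _ _).mp hr) with ⟨a, ha, hra⟩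
    rcases (mem_rsL n2 s).mp ((PySem.Set.mem_ofList _ _).mp hs) with ⟨b, hb, hsb⟩
    refine ⟨a, b, ha, hb, ?_⟩
    rw [keyf, hra, hsb]
    exact hpm
  · rintro ⟨a, b, ha, hb, hk⟩
    set r := PySem.Int.mod ((a : Int) * a) n2 with hr
    set s := PySem.Int.mod ((b : Int) * b) n2 with hs
    have hru : r ∈ PySem.Set.ofList (rsL n2) :=
      (PySem.Set.mem_ofList _ _).mpr ((mem_rsL n2 r).mpr ⟨a, ha, rfl⟩)
    have hsu : s ∈ PySem.Set.ofList (rsL n2) :=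
      (PySem.Set.mem_ofList _ _).mpr ((mem_rsL n2 s).mpr ⟨b, hb, rfl⟩)
    refine List.mem_map.mpr ⟨(PySem.Int.mod (r + s) n2,
      ((rsL n2).count r : Int) * ((rsL n2).count s : Int)), ?_, hk⟩
    refine List.mem_flatMap.mpr ⟨(r, ((rsL n2).count r : Int)), ?_, ?_⟩
    · exact List.mem_map.mpr ⟨r, hru, rfl⟩
    · exact List.mem_map.mpr ⟨(s, ((rsL n2).count s : Int)), List.mem_map.mpr ⟨s, hsu, rfl⟩, rfl⟩

lemma wA_pos (n2 : Int) : ∀ p ∈ pairsA n2, 0 < p.2 := by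
  intro p hp
  rcases List.mem_flatMap.mp hp with ⟨i, _, hpi⟩
  rcases List.mem_map.mp hpi with ⟨j, _, rfl⟩
  by_cases h : i = j <;> simp [h]

lemma main_eq (n : Int) : A229294 n = A229294_alt n := by
  have a1 := A_loop_eq (2 * n)
  have b1 := B_f_eq (2 * n)
  simp only [] at a1 b1
  simp only [A229294, A229294_alt]
  rw [a1, b1]
  have b2 := B_g_eq (2 * n)
  simp only [] at b2
  rw [b2]
  set n2 := 2 * n with hn2
  set dA := (pairsA n2).foldl wstep PySem.Dict.empty with hdA
  set dG := (pairsB n2).foldl wstep PySem.Dict.empty with hdG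
  have hgA : ∀ x, dA.getD x 0 = TT n2 x := fun x => by
    rw [hdA, getD_wfold, sumA_eq_TT, PySem.Dict.getD_empty, zero_add]
  have hgG : ∀ x, dG.getD x 0 = TT n2 x := fun x => by
    rw [hdG, getD_wfold, sumB_eq_TT, PySem.Dict.getD_empty, zero_add]
  have ccA : ∀ x, dA.contains x = true ↔ TT n2 x ≠ 0 := fun x => by
    rw [PySem.Dict.contains_iff_mem_keys, hdA, keys_wfold, PySem.Set.mem_ofList,
      mem_fst_iff_sum_ne _ _ (wA_pos n2), sumA_eq_TT]
  have hmem : ∀ x, x ∈ dA.keys ↔ x ∈ dG.keys := fun x => by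
    rw [hdA, hdG, keys_wfold, keys_wfold, PySem.Set.mem_ofList, PySem.Set.mem_ofList,
      memA_iff, memB_iff]
  have hperm : dA.keys.Perm dG.keys :=
    (List.perm_ext_iff_of_nodup (nodup_keys_wfold _) (nodup_keys_wfold _)).mpr hmem
  -- A side: turn the accumulating fold into a sum
  rw [show (fun (count : Int) (i : Int) =>
        if dA.contains (PySem.Int.mod (n - i) n2) = true then
          count + dA.getD i 0 * dA.getD (PySem.Int.mod (n - i) n2) 0
        else count)
      = (fun (count : Int) (i : Int) =>
          count + (if dA.contains (PySem.Int.mod (n - i) n2) = true then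
            dA.getD i 0 * dA.getD (PySem.Int.mod (n - i) n2) 0 else 0)) from by
    funext c i
    by_cases h : dA.contains (PySem.Int.mod (n - i) n2) = true <;> simp [h]]
  rw [PySem.List.foldl_add, zero_add]
  -- B side: items as keys
  rw [PySem.Dict.items_eq_map_keys dG (nodup_keys_wfold _) 0, List.map_map]
  -- both are sums of the same function over permuted key lists
  have hEA : (dA.keys.map (fun i =>
      if dA.contains (PySem.Int.mod (n - i) n2) = true then
        dA.getD i 0 * dA.getD (PySem.Int.mod (n - i) n2) 0 else 0))
      = dA.keys.map (fun i => TT n2 i * TT n2 (PySem.Int.mod (n - i) n2)) := by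
    apply map_congr_mem
    intro i _
    by_cases h : dA.contains (PySem.Int.mod (n - i) n2) = true
    · rw [if_pos h, hgA, hgA]
    · rw [if_neg h]
      have h0 : TT n2 (PySem.Int.mod (n - i) n2) = 0 := by
        by_contra hne
        exact h ((ccA _).mpr hne)
      rw [h0, mul_zero]
  have hEB : (dG.keys.map ((fun mc : Int × Int =>
      mc.2 * dG.getD (PySem.Int.mod (n - mc.1) n2) 0) ∘ (fun k => (k, dG.getD k 0))))
      = dG.keys.map (fun i => TT n2 i * TT n2 (PySem.Int.mod (n - i) n2)) := by
    apply map_congr_mem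
    intro i _
    simp only [Function.comp_def]
    rw [hgG, hgG]
  rw [hEA, hEB]
  exact (hperm.map _).sum_eq

-- ===== VERDICT (by name: the statement is the Claim_ definition above) =====
theorem A229294_spec : Claim_equal_A229294 := by
  intro n _
  unfold Spec_A229294
  exact main_eq n
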